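-- pv_equiv track=rewrite | github.com/jorense/bible-coach | app/bible_coach.py | _determine_stage
-- ===== SOURCE A (Python) =====
-- from typing import List, Sequence
--
-- def _determine_stage(messages: Sequence[dict[str, str]]) -> str:
--     assistant_messages = [m["content"].lower() for m in messages if m["role"] == "assistant"]
--     if not any(m["role"] == "user" for m in messages):
--         return "intro"
--     if not any("observation focus" in text for text in assistant_messages):
--         return "observation"
--     if not any("interpretation insights" in text for text in assistant_messages):
--         return "interpretation"
--     if not any("application coaching" in text for text in assistant_messages):
--         return "application"
--     return "follow_up"
-- ===== SOURCE B (Python) =====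
-- def _determine_stage(messages):
--     has_user = has_obs = has_interp = has_app = False
--     for m in messages:
--         if m["role"] == "user":
--             has_user = True
--         elif m["role"] == "assistant":
--             text = m["content"].lower()
--             has_obs = has_obs or "observation focus" in text
--             has_interp = has_interp or "interpretation insights" in text
--             has_app = has_app or "application coaching" in text
--     if not has_user:
--         return "intro"
--     if not has_obs:
--         return "observation"
--     if not has_interp:
--         return "interpretation"
--     if not has_app:
--         return "application"
--     return "follow_up"
-- ===== Notes on version B (the rewrite author's own statement) =====
-- stated objective: simpler
-- what changed: Replaces A's materialised assistant-text list plus four separate any() scans with one pass over messages that maintains four boolean flags, decided by a final if-chain.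
import Mathlib
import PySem

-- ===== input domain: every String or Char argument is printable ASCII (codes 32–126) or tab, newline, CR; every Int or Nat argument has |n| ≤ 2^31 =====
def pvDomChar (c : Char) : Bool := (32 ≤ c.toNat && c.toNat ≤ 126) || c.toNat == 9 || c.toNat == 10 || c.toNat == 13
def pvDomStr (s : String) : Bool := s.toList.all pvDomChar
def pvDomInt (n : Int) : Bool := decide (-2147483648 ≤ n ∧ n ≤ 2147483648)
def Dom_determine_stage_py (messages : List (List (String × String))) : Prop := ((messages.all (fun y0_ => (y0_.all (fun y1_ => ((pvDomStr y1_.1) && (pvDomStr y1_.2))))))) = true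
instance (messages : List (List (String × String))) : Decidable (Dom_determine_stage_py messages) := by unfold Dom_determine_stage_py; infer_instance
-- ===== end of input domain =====

-- B replaces A's materialised assistant-text list plus four separate any() scans with one
-- single pass over the messages maintaining four boolean flags (simpler decomposition).


-- dict lookup m[k]; Pre_ guarantees the key is present wherever this is evaluated
def pvGetS (m : List (String × String)) (k : String) : String :=
  ((PySem.Dict.mk m).get? k).getD ""

-- ===== PORT A =====
def determine_stage_py (messages : List (List (String × String))) : String :=
  let assistant_messages :=
    (messages.filter (fun m => pvGetS m "role" == "assistant")).map
      (fun m => PySem.Str.lower (pvGetS m "content"))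
  if !(messages.any (fun m => pvGetS m "role" == "user")) then "intro"
  else if !(assistant_messages.any (fun text => PySem.Str.isIn "observation focus" text)) then "observation"
  else if !(assistant_messages.any (fun text => PySem.Str.isIn "interpretation insights" text)) then "interpretation"
  else if !(assistant_messages.any (fun text => PySem.Str.isIn "application coaching" text)) then "application"
  else "follow_up"

-- ===== PORT B =====
-- loop body of Source B: state = (has_user, has_obs, has_interp, has_app)
def pvStep (st : Bool × Bool × Bool × Bool) (m : List (String × String)) : Bool × Bool × Bool × Bool :=
  if pvGetS m "role" == "user" then (true, st.2)
  else if pvGetS m "role" == "assistant" then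
    let text := PySem.Str.lower (pvGetS m "content")
    (st.1, st.2.1 || PySem.Str.isIn "observation focus" text,
           st.2.2.1 || PySem.Str.isIn "interpretation insights" text,
           st.2.2.2 || PySem.Str.isIn "application coaching" text)
  else st

def determine_stage_py_alt (messages : List (List (String × String))) : String :=
  let st := messages.foldl pvStep (false, false, false, false)
  if !st.1 then "intro"
  else if !st.2.1 then "observation"
  else if !st.2.2.1 then "interpretation"
  else if !st.2.2.2 then "application"
  else "follow_up"

-- ===== PRECONDITION & SPEC =====
-- Pre_ excludes exactly the inputs on which Python A raises KeyError: a message without a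
-- "role" key, or an assistant message without a "content" key.
def Pre_determine_stage_py (messages : List (List (String × String))) : Prop :=
  (messages.all (fun m =>
    (PySem.Dict.mk m).contains "role" &&
    (!(((PySem.Dict.mk m).get? "role").getD "" == "assistant") || (PySem.Dict.mk m).contains "content"))) = true
instance (messages : List (List (String × String))) : Decidable (Pre_determine_stage_py messages) := by unfold Pre_determine_stage_py; infer_instance
def pvWitness_determine_stage_py : (List (List (String × String))) := ([[("role", "user"), ("content", "hi")]])
def Spec_determine_stage_py (messages : List (List (String × String))) (out : String) : Prop := out = determine_stage_py_alt messages
instance (messages : List (List (String × String))) (out : String) : Decidable (Spec_determine_stage_py messages out) := by unfold Spec_determine_stage_py; infer_instance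

-- ===== CLAIM (what is proved, stated in full; the proofs are below) =====
def Claim_equal_determine_stage_py : Prop := ∀ (messages : List (List (String × String))), Dom_determine_stage_py messages → Pre_determine_stage_py messages → Spec_determine_stage_py messages (determine_stage_py messages)

-- ===== LEMMAS AND PROOFS =====

-- 'role == assistant and keyword in lowered content', the per-message test behind A's any-scans
def pvCheck (kw : String) (m : List (String × String)) : Bool :=
  (pvGetS m "role" == "assistant") && PySem.Str.isIn kw (PySem.Str.lower (pvGetS m "content"))

theorem pvStep_foldl (msgs : List (List (String × String))) (st : Bool × Bool × Bool × Bool) :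
    msgs.foldl pvStep st =
      (st.1 || msgs.any (fun m => pvGetS m "role" == "user"),
       st.2.1 || msgs.any (pvCheck "observation focus"),
       st.2.2.1 || msgs.any (pvCheck "interpretation insights"),
       st.2.2.2 || msgs.any (pvCheck "application coaching")) := by
  induction msgs generalizing st with
  | nil => simp
  | cons m rest ih =>
    obtain ⟨a, b, c, d⟩ := st
    simp only [List.foldl_cons, List.any_cons, ih]
    by_cases hu : pvGetS m "role" == "user"
    · have hna : pvCheck "observation focus" m = false ∧
          pvCheck "interpretation insights" m = false ∧
          pvCheck "application coaching" m = false := by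
        have : pvGetS m "role" = "user" := by simpa using hu
        refine ⟨?_, ?_, ?_⟩ <;> simp [pvCheck, this]
      simp [pvStep, hu, hna.1, hna.2.1, hna.2.2]
    · by_cases ha : pvGetS m "role" == "assistant"
      · simp [pvStep, hu, ha, pvCheck, Bool.or_assoc]
      · have hna : ∀ kw, pvCheck kw m = false := by
          intro kw; simp [pvCheck]; intro h; simp [h] at ha
        simp [pvStep, hu, ha, hna]

theorem determine_stage_py_eq (messages : List (List (String × String))) :
    determine_stage_py messages = determine_stage_py_alt messages := by
  unfold determine_stage_py determine_stage_py_alt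
  rw [pvStep_foldl]
  simp [List.any_filter, List.any_map, Function.comp, pvCheck]

-- ===== VERDICT (by name: the statement is the Claim_ definition above) =====
theorem determine_stage_py_spec : Claim_equal_determine_stage_py := by
  intro messages _ _
  exact (determine_stage_py_eq messages).symm ▸ rfl
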